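-- pv_equiv track=rewrite | github.com/Ryko1141/Guardian | database/soft_rule_detector.py | merge_similar_rules
-- ===== SOURCE A (Python) =====
-- from typing import Dict, List, Any, Optional
--
-- def merge_similar_rules(rules: List[Dict]) -> List[Dict]:
--     """
--     Merge similar soft rules to avoid duplication.
--
--     Args:
--         rules: List of extracted rules
--
--     Returns:
--         Merged list of rules
--     """
--     if not rules:
--         return []
--
--     # Group by rule_type
--     grouped = {}
--     for rule in rules:
--         rule_type = rule.get('rule_type', 'unknown')
--         if rule_type not in grouped:
--             grouped[rule_type] = []
--         grouped[rule_type].append(rule)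
--
--     # Keep best representative from each group
--     merged = []
--     for rule_type, group in grouped.items():
--         if len(group) == 1:
--             merged.append(group[0])
--         else:
--             # Prefer LLM-extracted rules (higher confidence)
--             # Otherwise take the first one
--             llm_rules = [r for r in group if r.get('extraction_method') == 'llm']
--             if llm_rules:
--                 merged.append(llm_rules[0])
--             else:
--                 merged.append(group[0])
--
--     return merged
-- ===== SOURCE B (Python) =====
-- from typing import Dict, List
--
-- def merge_similar_rules(rules: List[Dict]) -> List[Dict]:
--     """Merge similar soft rules: one pass keeping the best representative per rule_type."""
--     if not rules:
--         return []
--     reps = {}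
--     for rule in rules:
--         rule_type = rule.get('rule_type', 'unknown')
--         if rule_type not in reps:
--             reps[rule_type] = rule
--         else:
--             rep = reps[rule_type]
--             if rep.get('extraction_method') != 'llm' and rule.get('extraction_method') == 'llm':
--                 reps[rule_type] = rule
--     return list(reps.values())
-- ===== Notes on version B (the rewrite author's own statement) =====
-- stated objective: simpler
-- what changed: Replaces A's two-phase group-by-type-into-lists-then-reduce-each-group with a single pass that keeps only one representative per rule_type in an insertion-ordered dict, overwriting it in place when an llm-extracted rule supersedes a non-llm one.
import Mathlib
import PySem

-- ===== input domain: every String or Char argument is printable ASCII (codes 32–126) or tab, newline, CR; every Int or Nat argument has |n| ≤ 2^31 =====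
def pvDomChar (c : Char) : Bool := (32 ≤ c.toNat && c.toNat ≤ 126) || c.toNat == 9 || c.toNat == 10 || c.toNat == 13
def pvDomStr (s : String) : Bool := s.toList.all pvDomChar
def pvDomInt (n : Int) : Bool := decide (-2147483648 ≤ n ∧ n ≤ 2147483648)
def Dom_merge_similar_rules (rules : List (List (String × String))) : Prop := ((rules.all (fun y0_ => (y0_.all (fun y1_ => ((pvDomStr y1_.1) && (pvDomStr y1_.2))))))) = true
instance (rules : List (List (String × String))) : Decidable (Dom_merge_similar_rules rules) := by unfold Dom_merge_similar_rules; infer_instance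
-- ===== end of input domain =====

-- B replaces A's group-by-type-into-lists-then-reduce with a single pass keeping one
-- representative per rule_type in an insertion-ordered dict (simpler: no per-type lists).


-- ===== PORT A =====
-- rule.get(k, dflt): first-match lookup in the rule's association list.
-- (For `r.get('extraction_method') == 'llm'` both ports use default "", which compares
-- to "llm" exactly as Python's None does: both are ≠ 'llm'.)
def ruleGet (r : List (String × String)) (k dflt : String) : String :=
  (PySem.Dict.mk r).getD k dflt

def merge_similar_rules (rules : List (List (String × String))) : List (List (String × String)) :=
  if rules = [] then []
  else
    let grouped : PySem.Dict String (List (List (String × String))) :=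
      rules.foldl (fun g rule =>
        g.modify (ruleGet rule "rule_type" "unknown") [] (fun l => l ++ [rule]))
        PySem.Dict.empty
    grouped.items.foldl (fun merged p =>
      if p.2.length = 1 then merged ++ [PySem.List.pyGetD p.2 0 []]
      else
        let llm_rules := p.2.filter (fun r => ruleGet r "extraction_method" "" == "llm")
        if llm_rules ≠ [] then merged ++ [PySem.List.pyGetD llm_rules 0 []]
        else merged ++ [PySem.List.pyGetD p.2 0 []]) []

-- ===== PORT B =====
def merge_similar_rules_alt (rules : List (List (String × String))) : List (List (String × String)) :=
  if rules = [] then []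
  else
    (rules.foldl (fun reps rule =>
      let rule_type := ruleGet rule "rule_type" "unknown"
      match reps.get? rule_type with
      | none => reps.insert rule_type rule
      | some rep =>
        if ruleGet rep "extraction_method" "" ≠ "llm" ∧
           ruleGet rule "extraction_method" "" = "llm"
        then reps.insert rule_type rule
        else reps) PySem.Dict.empty).values

-- ===== PRECONDITION & SPEC =====
def Spec_merge_similar_rules (rules : List (List (String × String))) (out : List (List (String × String))) : Prop := out = merge_similar_rules_alt rules
instance (rules : List (List (String × String))) (out : List (List (String × String))) : Decidable (Spec_merge_similar_rules rules out) := by unfold Spec_merge_similar_rules; infer_instance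

-- ===== CLAIM (what is proved, stated in full; the proofs are below) =====
def Claim_equal_merge_similar_rules : Prop := ∀ (rules : List (List (String × String))), Dom_merge_similar_rules rules → Spec_merge_similar_rules rules (merge_similar_rules rules)

-- ===== LEMMAS AND PROOFS =====

abbrev pvRule := List (String × String)
def pvIsLlm (r : pvRule) : Bool := ruleGet r "extraction_method" "" == "llm"
def pvBest (g : List pvRule) : pvRule :=
  match g.filter pvIsLlm with
  | [] => g.headD []
  | r :: _ => r

lemma pvBest_singleton (r : pvRule) : pvBest [r] = r := by
  unfold pvBest
  cases h : pvIsLlm r <;> simp [List.filter, h]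

lemma pvBest_append (g : List pvRule) (hg : g ≠ []) (r : pvRule) :
    pvBest (g ++ [r]) =
      if pvIsLlm (pvBest g) = false ∧ pvIsLlm r = true then r else pvBest g := by
  unfold pvBest
  rcases hf : g.filter pvIsLlm with _ | ⟨a, t⟩
  · have hall : ∀ x ∈ g, ¬ pvIsLlm x := by
      simpa [List.filter_eq_nil_iff] using hf
    have hhead : pvIsLlm (g.headD []) = false := by
      rcases g with _ | ⟨x, xs⟩
      · exact absurd rfl hg
      · simpa using hall x (by simp)
    rw [List.headD_eq_head?_getD] at hhead
    cases hr : pvIsLlm r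
    · simp [List.filter_append, hf, List.filter, hr]
      rcases g with _ | ⟨x, xs⟩
      · exact absurd rfl hg
      · simp
    · simp [List.filter_append, hf, List.filter, hr, hhead]
  · have ha : pvIsLlm a = true := by
      have : a ∈ g.filter pvIsLlm := by rw [hf]; simp
      exact (List.mem_filter.mp this).2
    simp [List.filter_append, hf, ha]

lemma pvLlm_lambda : (fun r => ruleGet r "extraction_method" "" == "llm") = pvIsLlm := rfl

lemma pvA_choice (acc : List pvRule) (p : String × List pvRule) :
    (if p.2.length = 1 then acc ++ [PySem.List.pyGetD p.2 0 []]
      else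
        if p.2.filter (fun r => ruleGet r "extraction_method" "" == "llm") ≠ [] then
          acc ++ [PySem.List.pyGetD (p.2.filter (fun r => ruleGet r "extraction_method" "" == "llm")) 0 []]
        else acc ++ [PySem.List.pyGetD p.2 0 []])
    = acc ++ [pvBest p.2] := by
  rw [pvLlm_lambda]
  rcases p with ⟨k, g⟩
  rcases g with _ | ⟨r, t⟩
  · simp [pvBest, PySem.List.pyGetD, PySem.List.pyGet?, PySem.List.pyIdx?]
  · rcases t with _ | ⟨r2, t2⟩
    · simp [pvBest_singleton, PySem.List.pyGetD, PySem.List.pyGet?, PySem.List.pyIdx?]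
    · show (if (r :: r2 :: t2).length = 1 then _ else _) = _
      rw [if_neg (by simp)]
      simp only [pvBest]
      rcases hf : (r :: r2 :: t2).filter pvIsLlm with _ | ⟨a, ta⟩
      · simp [PySem.List.pyGetD, PySem.List.pyGet?, PySem.List.pyIdx?,
              show (0:Int) ≤ (t2.length:Int) + 1 by positivity]
      · simp [PySem.List.pyGetD, PySem.List.pyGet?, PySem.List.pyIdx?,
              show (0:Int) ≤ (ta.length:Int) by positivity]

lemma pvA_fold (its : List (String × List pvRule)) (acc : List pvRule) :
    its.foldl (fun merged p =>
      if p.2.length = 1 then merged ++ [PySem.List.pyGetD p.2 0 []]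
      else
        let llm_rules := p.2.filter (fun r => ruleGet r "extraction_method" "" == "llm")
        if llm_rules ≠ [] then merged ++ [PySem.List.pyGetD llm_rules 0 []]
        else merged ++ [PySem.List.pyGetD p.2 0 []]) acc
    = acc ++ its.map (fun p => pvBest p.2) := by
  induction its generalizing acc with
  | nil => simp
  | cons p t ih => rw [List.foldl_cons]; show List.foldl _ (if _ then _ else _) t = _
                   rw [pvA_choice, ih, List.map_cons]; simp

def pvF (p : String × List pvRule) : String × pvRule := (p.1, pvBest p.2)

def pvAstep (g : PySem.Dict String (List pvRule)) (rule : pvRule) : PySem.Dict String (List pvRule) :=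
  g.modify (ruleGet rule "rule_type" "unknown") [] (fun l => l ++ [rule])

def pvBstep (reps : PySem.Dict String pvRule) (rule : pvRule) : PySem.Dict String pvRule :=
  match reps.get? (ruleGet rule "rule_type" "unknown") with
  | none => reps.insert (ruleGet rule "rule_type" "unknown") rule
  | some rep =>
    if ruleGet rep "extraction_method" "" ≠ "llm" ∧ ruleGet rule "extraction_method" "" = "llm"
    then reps.insert (ruleGet rule "rule_type" "unknown") rule
    else reps

lemma pv_get?_mapF (g : PySem.Dict String (List pvRule)) (k : String) :
    (PySem.Dict.mk (g.items.map pvF)).get? k = (g.get? k).map pvBest := by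
  simp [PySem.Dict.get?, List.find?_map, Function.comp_def, pvF, Option.map_map]

lemma pv_uniq (g : PySem.Dict String (List pvRule)) (hnd : g.keys.Nodup) {rt : String}
    {grp : List pvRule} (h : g.get? rt = some grp) :
    ∀ p ∈ g.items, p.1 = rt → p.2 = grp := by
  rintro ⟨k, v⟩ hp rfl
  have := PySem.Dict.get?_of_mem_items g hp hnd
  rw [h] at this
  exact (Option.some_inj.mp this).symm

lemma pvStep (g : PySem.Dict String (List pvRule)) (rule : pvRule)
    (hnd : g.keys.Nodup) (hne : ∀ p ∈ g.items, p.2 ≠ []) :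
    pvBstep ⟨g.items.map pvF⟩ rule = ⟨(pvAstep g rule).items.map pvF⟩ ∧
    (pvAstep g rule).keys.Nodup ∧ (∀ p ∈ (pvAstep g rule).items, p.2 ≠ []) := by
  set rt := ruleGet rule "rule_type" "unknown" with hrt
  have hA : pvAstep g rule = g.insert rt (g.getD rt [] ++ [rule]) := rfl
  cases hg : g.get? rt with
  | none =>
    have hcont : g.contains rt = false := (PySem.Dict.get?_eq_none_iff_contains g rt).mp hg
    have hd : (PySem.Dict.mk (g.items.map pvF)).get? rt = none := by
      rw [pv_get?_mapF, hg]; rfl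
    have hcontd : (PySem.Dict.mk (g.items.map pvF)).contains rt = false := by
      rw [PySem.Dict.contains_eq_isSome_get?, hd]; rfl
    have hgetD : g.getD rt [] = [] := PySem.Dict.getD_of_not_contains g [] hcont
    refine ⟨?_, ?_, ?_⟩
    · show pvBstep _ rule = _
      unfold pvBstep
      rw [← hrt, hd, hA, hgetD]
      apply PySem.Dict.ext
      rw [PySem.Dict.items_insert_of_not_contains _ _ hcontd,
          PySem.Dict.items_insert_of_not_contains _ _ hcont]
      simp [pvF, pvBest_singleton]
    · rw [hA, PySem.Dict.keys_insert_of_not_contains _ _ hcont]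
      have : rt ∉ g.keys := fun hm => by
        simp [(PySem.Dict.contains_iff_mem_keys g rt).mpr hm] at hcont
      simp [List.nodup_append, hnd]
      exact fun a ha h => this (h ▸ ha)
    · intro p hp
      rw [hA, hgetD, PySem.Dict.items_insert_of_not_contains _ _ hcont] at hp
      rcases List.mem_append.mp hp with h | h
      · exact hne p h
      · simp at h; subst h; simp
  | some grp =>
    have hmem : (rt, grp) ∈ g.items := PySem.Dict.mem_items_of_get?_eq_some g hg
    have hgrp : grp ≠ [] := hne _ hmem
    have hcont : g.contains rt = true := by
      rw [PySem.Dict.contains_eq_isSome_get?, hg]; rfl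
    have hd : (PySem.Dict.mk (g.items.map pvF)).get? rt = some (pvBest grp) := by
      rw [pv_get?_mapF, hg]; rfl
    have hcontd : (PySem.Dict.mk (g.items.map pvF)).contains rt = true := by
      rw [PySem.Dict.contains_eq_isSome_get?, hd]; rfl
    have hgetD : g.getD rt [] = grp := PySem.Dict.getD_of_get?_eq_some g [] hg
    have huniq := pv_uniq g hnd hg
    have hitemsA : (pvAstep g rule).items =
        g.items.map (fun p => if p.1 == rt then (rt, grp ++ [rule]) else p) := by
      rw [hA, hgetD, PySem.Dict.items_insert_of_contains _ _ hcont]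
    refine ⟨?_, ?_, ?_⟩
    · show pvBstep _ rule = _
      unfold pvBstep
      rw [← hrt, hd]
      show (if ruleGet (pvBest grp) "extraction_method" "" ≠ "llm" ∧
              ruleGet rule "extraction_method" "" = "llm"
            then (PySem.Dict.mk (g.items.map pvF)).insert rt rule
            else PySem.Dict.mk (g.items.map pvF)) = _
      have hcondeq : (ruleGet (pvBest grp) "extraction_method" "" ≠ "llm" ∧
          ruleGet rule "extraction_method" "" = "llm") ↔
          (pvIsLlm (pvBest grp) = false ∧ pvIsLlm rule = true) := by
        simp [pvIsLlm]
      by_cases hc : pvIsLlm (pvBest grp) = false ∧ pvIsLlm rule = true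
      · rw [if_pos (hcondeq.mpr hc)]
        apply PySem.Dict.ext
        rw [PySem.Dict.items_insert_of_contains _ _ hcontd, hitemsA, List.map_map, List.map_map]
        apply List.map_congr_left
        intro p hp
        by_cases hk : p.1 = rt
        · have hv : p.2 = grp := huniq p hp hk
          simp [pvF, hk, pvBest_append grp hgrp rule, hc, hv]
        · simp [pvF, hk]
      · rw [if_neg (fun h => hc (hcondeq.mp h))]
        apply PySem.Dict.ext
        show g.items.map pvF = _
        rw [hitemsA, List.map_map]
        apply List.map_congr_left
        intro p hp
        by_cases hk : p.1 = rt
        · have hv : p.2 = grp := huniq p hp hk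
          simp [pvF, hk, pvBest_append grp hgrp rule, hc, hv]
        · simp [pvF, hk]
    · rw [hA, PySem.Dict.keys_insert_of_contains _ _ hcont]; exact hnd
    · intro p hp
      rw [hitemsA] at hp
      rcases List.mem_map.mp hp with ⟨q, hq, hpq⟩
      by_cases hk : q.1 = rt
      · simp [hk] at hpq; subst hpq; simp
      · simp [hk] at hpq; subst hpq; exact hne q hq

lemma pvInv (l : List pvRule) (g : PySem.Dict String (List pvRule))
    (hnd : g.keys.Nodup) (hne : ∀ p ∈ g.items, p.2 ≠ []) :
    (l.foldl pvBstep ⟨g.items.map pvF⟩) = ⟨(l.foldl pvAstep g).items.map pvF⟩ ∧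
    (l.foldl pvAstep g).keys.Nodup ∧ ∀ p ∈ (l.foldl pvAstep g).items, p.2 ≠ [] := by
  induction l generalizing g with
  | nil => exact ⟨rfl, hnd, hne⟩
  | cons rule t ih =>
    obtain ⟨h1, h2, h3⟩ := pvStep g rule hnd hne
    simp only [List.foldl_cons, h1]
    exact ih (pvAstep g rule) h2 h3

-- ===== VERDICT (by name: the statement is the Claim_ definition above) =====
theorem merge_similar_rules_spec : Claim_equal_merge_similar_rules := by
  intro rules _
  unfold Spec_merge_similar_rules merge_similar_rules merge_similar_rules_alt
  by_cases h : rules = []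
  · simp [h]
  · rw [if_neg h, if_neg h]
    obtain ⟨h1, -, -⟩ := pvInv rules PySem.Dict.empty
      (by simp [PySem.Dict.empty, PySem.Dict.keys])
      (by simp [PySem.Dict.empty])
    show (rules.foldl pvAstep PySem.Dict.empty).items.foldl _ [] =
      (rules.foldl pvBstep PySem.Dict.empty).values
    rw [show (PySem.Dict.empty : PySem.Dict String pvRule)
          = ⟨(PySem.Dict.empty : PySem.Dict String (List pvRule)).items.map pvF⟩ from rfl, h1]
    rw [pvA_fold]
    simp [PySem.Dict.values, pvF]
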